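-- pv_equiv track=rewrite | github.com/GrimFandango42/Golf-swing-vro | adaptive_coaching/coaching_adaptation.py | _simplify_response
-- ===== SOURCE A (Python) =====
-- def _simplify_response(response: str) -> str:
--     """Simplify response for beginners"""
--     # Replace complex terms with simple ones
--     simplifications = {
--         "biomechanical": "body position",
--         "kinematic": "movement",
--         "angular": "turning",
--         "trajectory": "path"
--     }
--
--     for complex_term, simple_term in simplifications.items():
--         response = response.replace(complex_term, simple_term)
--
--     return response
-- ===== SOURCE B (Python) =====
-- def _simplify_response(response: str) -> str:
--     """Simplify response for beginners: one left-to-right scan replacing each jargon term."""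
--     simplifications = {
--         "biomechanical": "body position",
--         "kinematic": "movement",
--         "angular": "turning",
--         "trajectory": "path",
--     }
--     out = []
--     i = 0
--     n = len(response)
--     while i < n:
--         for term, simple in simplifications.items():
--             if response.startswith(term, i):
--                 out.append(simple)
--                 i += len(term)
--                 break
--         else:
--             out.append(response[i])
--             i += 1
--     return "".join(out)
-- ===== Notes on version B (the rewrite author's own statement) =====
-- stated objective: alternative
-- what changed: B builds the output in one left-to-right scan of the string, replacing whichever jargon term starts at the current position, instead of A's four separate full-string .replace passes.
-- intended difference: On inputs containing the substring 'kinematicrajectory', A's second replace pass turns it into 'movementrajectory' and A's last pass then also replaces the newly created term, so A returns 'movemenpath' there; B replaces only terms present in the original text and returns 'movementrajectory', the intended behaviour, since the cascade replacement is an accident of sequential replaces. — e.g. on _simplify_response("kinematicrajectory"): A returns "movemenpath", B returns "movementrajectory"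
import Mathlib
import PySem

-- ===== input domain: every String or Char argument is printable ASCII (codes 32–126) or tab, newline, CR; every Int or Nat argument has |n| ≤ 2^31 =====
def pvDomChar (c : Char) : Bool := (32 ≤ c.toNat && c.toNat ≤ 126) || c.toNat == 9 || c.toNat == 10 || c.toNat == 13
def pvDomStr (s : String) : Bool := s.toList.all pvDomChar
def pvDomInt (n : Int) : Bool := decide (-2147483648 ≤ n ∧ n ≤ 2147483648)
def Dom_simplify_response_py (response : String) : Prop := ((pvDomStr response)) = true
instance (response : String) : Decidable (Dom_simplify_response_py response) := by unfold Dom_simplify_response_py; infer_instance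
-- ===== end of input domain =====

-- B replaces the four jargon terms in ONE left-to-right scan instead of A's four sequential
-- full-string .replace passes (objective: alternative); on inputs containing
-- "kinematicrajectory" the sequential passes cascade and the two differ (see D_ below).

-- ===== PORT A =====
def simplify_response_py (response : String) : String :=
  let simplifications : PySem.Dict String String :=
    PySem.Dict.ofList
      [("biomechanical", "body position"), ("kinematic", "movement"),
       ("angular", "turning"), ("trajectory", "path")]
  simplifications.items.foldl (fun r p => PySem.Str.replace r p.1 p.2) response

-- ===== PORT B =====
-- the four (term, simple) pairs of B's dict, as char lists, in dict order
def pvKB : List Char := "biomechanical".toList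
def pvRB : List Char := "body position".toList
def pvKK : List Char := "kinematic".toList
def pvRK : List Char := "movement".toList
def pvKA : List Char := "angular".toList
def pvRA : List Char := "turning".toList
def pvKT : List Char := "trajectory".toList
def pvRT : List Char := "path".toList

-- B's while-loop: at each position try the four terms in dict order, else copy one char
def pvAltScan : List Char → List Char
  | [] => []
  | c :: t =>
    if pvKB.isPrefixOf (c :: t) then pvRB ++ pvAltScan (List.drop (pvKB.length - 1) t)
    else if pvKK.isPrefixOf (c :: t) then pvRK ++ pvAltScan (List.drop (pvKK.length - 1) t)
    else if pvKA.isPrefixOf (c :: t) then pvRA ++ pvAltScan (List.drop (pvKA.length - 1) t)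
    else if pvKT.isPrefixOf (c :: t) then pvRT ++ pvAltScan (List.drop (pvKT.length - 1) t)
    else c :: pvAltScan t
termination_by l => l.length
decreasing_by all_goals simp [List.length_drop]

def simplify_response_py_alt (response : String) : String :=
  String.ofList (pvAltScan response.toList)

-- ===== PRECONDITION & SPEC =====
-- On inputs containing "kinematicrajectory", A's kinematic→movement pass creates a fresh
-- "trajectory" (the trailing 't' of "movement" + "rajectory") which its last pass then also
-- replaces, giving "…movemenpath…"; B replaces only terms present in the original text and
-- returns "…movementrajectory…", which is the intended behaviour.
def D_simplify_response_py (response : String) : Prop :=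
  PySem.Str.isIn "kinematicrajectory" response = true
instance (response : String) : Decidable (D_simplify_response_py response) := by
  unfold D_simplify_response_py; infer_instance

def Spec_simplify_response_py (response : String) (out : String) : Prop :=
  ¬ D_simplify_response_py response → out = simplify_response_py_alt response
instance (response : String) (out : String) : Decidable (Spec_simplify_response_py response out) := by
  unfold Spec_simplify_response_py; infer_instance

def pvDiffWitness_simplify_response_py : String := "kinematicrajectory"
def pvDiffWitnessOut_simplify_response_py : String × String := ("movemenpath", "movementrajectory")

-- ===== CLAIM (what is proved, stated in full; the proofs are below) =====
def Claim_unchanged_simplify_response_py : Prop := ∀ (response : String), Dom_simplify_response_py response → Spec_simplify_response_py response (simplify_response_py response)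
def Claim_changed_simplify_response_py : Prop := Dom_simplify_response_py (pvDiffWitness_simplify_response_py) ∧ D_simplify_response_py (pvDiffWitness_simplify_response_py) ∧ simplify_response_py (pvDiffWitness_simplify_response_py) = pvDiffWitnessOut_simplify_response_py.1 ∧ simplify_response_py_alt (pvDiffWitness_simplify_response_py) = pvDiffWitnessOut_simplify_response_py.2 ∧ pvDiffWitnessOut_simplify_response_py.1 ≠ pvDiffWitnessOut_simplify_response_py.2
def Claim_exact_simplify_response_py : Prop := ∀ (response : String), Dom_simplify_response_py response → D_simplify_response_py response → simplify_response_py response ≠ simplify_response_py_alt response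

-- ===== LEMMAS AND PROOFS =====

-- proof-side model of one CPython str.replace pass (old nonempty), structurally recursive
def pvRep (k rp : List Char) : List Char → List Char
  | [] => []
  | c :: t =>
    if k.isPrefixOf (c :: t) then rp ++ pvRep k rp (List.drop (k.length - 1) t)
    else c :: pvRep k rp t
termination_by l => l.length
decreasing_by all_goals simp [List.length_drop]

theorem pvGo_eq (k rp : List Char) (hk : k ≠ []) :
    ∀ (fuel : Nat) (l acc : List Char), l.length ≤ fuel →
      PySem.Chars.replace.go k rp fuel l acc = acc.reverse ++ pvRep k rp l := by
  intro fuel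
  induction fuel with
  | zero =>
    intro l acc hl
    have : l = [] := by
      cases l with
      | nil => rfl
      | cons c t => simp at hl
    subst this
    simp [PySem.Chars.replace.go, pvRep]
  | succ n ih =>
    intro l acc hl
    cases l with
    | nil => simp [PySem.Chars.replace.go, pvRep]
    | cons c t =>
      rw [PySem.Chars.replace.go]
      by_cases hp : k.isPrefixOf (c :: t)
      · rw [if_pos hp]
        obtain ⟨m, hm⟩ : ∃ m, k.length = m + 1 := by
          cases k with
          | nil => exact absurd rfl hk
          | cons a b => exact ⟨b.length, by simp⟩
        have hdrop : List.drop k.length (c :: t) = List.drop (k.length - 1) t := by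
          rw [hm]; simp
        rw [hdrop, ih _ _ (by simp at hl ⊢; omega)]
        rw [pvRep, if_pos hp]
        simp
      · rw [if_neg hp, ih _ _ (by simp at hl ⊢; omega)]
        rw [pvRep, if_neg hp]
        simp

theorem pvReplace_eq (s k rp : List Char) (hk : k ≠ []) :
    PySem.Chars.replace s k rp = pvRep k rp s := by
  rw [PySem.Chars.replace]
  rw [if_neg (by simp [List.isEmpty_iff, hk])]
  simpa using pvGo_eq k rp hk s.length s [] le_rfl

theorem pvRep_nil (k rp : List Char) : pvRep k rp [] = [] := by rw [pvRep]

theorem pvRep_skip {k : List Char} (rp : List Char) {c : Char} {t : List Char}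
    (h : ¬ k.isPrefixOf (c :: t)) : pvRep k rp (c :: t) = c :: pvRep k rp t := by
  rw [pvRep, if_neg h]

theorem pvRep_self (k rp x : List Char) (hk : k ≠ []) :
    pvRep k rp (k ++ x) = rp ++ pvRep k rp x := by
  cases k with
  | nil => exact absurd rfl hk
  | cons a b =>
    rw [List.cons_append, pvRep,
        if_pos (List.isPrefixOf_iff_prefix.mpr (by exact ⟨x, by simp⟩))]
    simp

-- a prefix of r ++ x agrees with r on the overlap, independently of x
theorem pvPrefixCompat {k r x : List Char} (h : k <+: r ++ x) :
    List.take r.length k = List.take k.length r := by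
  have hk : k = List.take k.length (r ++ x) := List.prefix_iff_eq_take.mp h
  have hr : r = List.take r.length (r ++ x) := by simp
  calc List.take r.length k = List.take r.length (List.take k.length (r ++ x)) := by rw [← hk]
    _ = List.take (min r.length k.length) (r ++ x) := by rw [List.take_take]
    _ = List.take (min k.length r.length) (r ++ x) := by rw [Nat.min_comm]
    _ = List.take k.length (List.take r.length (r ++ x)) := by rw [List.take_take]
    _ = List.take k.length r := by rw [← hr]

-- scanning k over r ++ x copies r unchanged when no occurrence of k starts inside r
theorem pvSkip (k rp : List Char) :
    ∀ (r x : List Char), (∀ q ∈ r.tails, q ≠ [] → ¬ k <+: (q ++ x)) →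
      pvRep k rp (r ++ x) = r ++ pvRep k rp x := by
  intro r
  induction r with
  | nil => intro x _; simp
  | cons c r' ih =>
    intro x h
    have hnp : ¬ k.isPrefixOf (c :: (r' ++ x)) := by
      intro hp
      exact h (c :: r') ((List.mem_tails _ _).mpr (List.suffix_refl _)) (by simp)
        (by simpa [List.cons_append] using List.isPrefixOf_iff_prefix.mp hp)
    rw [List.cons_append, pvRep_skip rp hnp,
        ih x (fun q hq hne => h q ((List.mem_tails _ _).mpr
          (((List.mem_tails _ _).mp hq).trans (List.suffix_cons c r'))) hne)]
    rfl

-- skip when every alignment of k inside r already mismatches within r (decidable, x-free)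
theorem pvSkipBlocked (k rp r : List Char)
    (hb : ∀ q ∈ r.tails, q ≠ [] → List.take q.length k ≠ List.take k.length q) :
    ∀ x, pvRep k rp (r ++ x) = r ++ pvRep k rp x := by
  intro x
  exact pvSkip k rp r x (fun q hq hne hpre => hb q hq hne (pvPrefixCompat hpre))

-- if p cannot align with the replacement rp, a prefix p of the output was a prefix of the input
theorem pvAvoid (k rp : List Char) :
    ∀ (t p : List Char),
      (∀ q ∈ p.tails, q ≠ [] → List.take rp.length q ≠ List.take q.length rp) →
      p <+: pvRep k rp t → p <+: t := by
  intro t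
  induction t using pvRep.induct k with
  | case1 =>
    intro p _ hp
    rw [pvRep_nil] at hp
    simpa using hp
  | case2 c t hp ih =>
    intro p hcond hpre
    rw [pvRep, if_pos hp] at hpre
    cases p with
    | nil => exact List.nil_prefix
    | cons d p' =>
      exact absurd (pvPrefixCompat hpre)
        (hcond (d :: p') ((List.mem_tails _ _).mpr (List.suffix_refl _)) (by simp))
  | case3 c t hp ih =>
    intro p hcond hpre
    rw [pvRep_skip rp hp] at hpre
    cases p with
    | nil => exact List.nil_prefix
    | cons d p' =>
      rw [List.cons_prefix_cons] at hpre ⊢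
      exact ⟨hpre.1,
        ih p' (fun q hq hne => hcond q ((List.mem_tails _ _).mpr
          (((List.mem_tails _ _).mp hq).trans (List.suffix_cons d p'))) hne) hpre.2⟩

-- the chain of A's four passes
def pvChain (t : List Char) : List Char :=
  pvRep pvKT pvRT (pvRep pvKA pvRA (pvRep pvKK pvRK (pvRep pvKB pvRB t)))

theorem pvSuffix_noKR {t u : List Char} (hs : u <:+ t)
    (h : ¬ ("kinematicrajectory".toList <:+: t)) :
    ¬ ("kinematicrajectory".toList <:+: u) :=
  fun hi => h (hi.trans hs.isInfix)

theorem pvMain : ∀ t : List Char, ¬ ("kinematicrajectory".toList <:+: t) →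
    pvChain t = pvAltScan t := by
  intro t
  induction t using pvAltScan.induct with
  | case1 =>
    intro _
    simp [pvChain, pvRep_nil, pvAltScan]
  | case2 c t hB ih =>
    intro hKR
    have hL : (pvKB.length - 1 : Nat) = 12 := by decide
    rw [hL] at ih
    obtain ⟨w, hw⟩ := List.isPrefixOf_iff_prefix.mp hB
    have hwd : w = t.drop 12 := by
      have h13 : (pvKB ++ w).drop 13 = w := by
        have hl : pvKB.length = 13 := by decide
        rw [← hl, List.drop_left]
      rw [hw] at h13
      simpa using h13.symm
    subst hwd
    have hchain : pvChain (c :: t) = pvRB ++ pvChain (t.drop 12) := by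
      rw [pvChain, ← hw, pvRep_self _ _ _ (by decide),
          pvSkipBlocked pvKK pvRK pvRB (by decide),
          pvSkipBlocked pvKA pvRA pvRB (by decide),
          pvSkipBlocked pvKT pvRT pvRB (by decide)]
      rfl
    rw [hchain, pvAltScan, if_pos hB, hL,
        ih (pvSuffix_noKR ((List.drop_suffix _ _).trans (List.suffix_cons _ _)) hKR)]
  | case3 c t hB hK ih =>
    intro hKR
    have hL : (pvKK.length - 1 : Nat) = 8 := by decide
    rw [hL] at ih
    obtain ⟨w, hw⟩ := List.isPrefixOf_iff_prefix.mp hK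
    have hwd : w = t.drop 8 := by
      have h9 : (pvKK ++ w).drop 9 = w := by
        have hl : pvKK.length = 9 := by decide
        rw [← hl, List.drop_left]
      rw [hw] at h9
      simpa using h9.symm
    subst hwd
    -- the processed tail cannot begin with "rajectory" (else the input contained "kinematicrajectory")
    have hraj : ¬ (("rajectory".toList : List Char) <+:
        pvRep pvKA pvRA (pvRep pvKK pvRK (pvRep pvKB pvRB (t.drop 8)))) := by
      intro hp
      have h1 := pvAvoid pvKA pvRA _ _ (by decide) hp
      have h2 := pvAvoid pvKK pvRK _ _ (by decide) h1
      have h3 := pvAvoid pvKB pvRB _ _ (by decide) h2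
      obtain ⟨z, hz⟩ := h3
      apply hKR
      refine List.IsPrefix.isInfix ⟨z, ?_⟩
      have hsplit : ("kinematicrajectory".toList : List Char) = pvKK ++ "rajectory".toList := by decide
      rw [hsplit, List.append_assoc, hz, hw]
    have hskipT : pvRep pvKT pvRT (pvRK ++ pvRep pvKA pvRA (pvRep pvKK pvRK (pvRep pvKB pvRB (t.drop 8))))
        = pvRK ++ pvRep pvKT pvRT (pvRep pvKA pvRA (pvRep pvKK pvRK (pvRep pvKB pvRB (t.drop 8)))) := by
      apply pvSkip
      intro q hq hne hpre
      have hq' : q = "movement".toList ∨ q = "ovement".toList ∨ q = "vement".toList ∨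
          q = "ement".toList ∨ q = "ment".toList ∨ q = "ent".toList ∨ q = "nt".toList ∨
          q = "t".toList ∨ q = [] := by
        have htails : pvRK.tails = ["movement".toList, "ovement".toList, "vement".toList,
            "ement".toList, "ment".toList, "ent".toList, "nt".toList, "t".toList, []] := by decide
        rw [htails] at hq
        simpa using hq
      rcases hq' with rfl | rfl | rfl | rfl | rfl | rfl | rfl | rfl | rfl
      · exact absurd (pvPrefixCompat hpre) (by decide)
      · exact absurd (pvPrefixCompat hpre) (by decide)
      · exact absurd (pvPrefixCompat hpre) (by decide)
      · exact absurd (pvPrefixCompat hpre) (by decide)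
      · exact absurd (pvPrefixCompat hpre) (by decide)
      · exact absurd (pvPrefixCompat hpre) (by decide)
      · exact absurd (pvPrefixCompat hpre) (by decide)
      · -- q = "t": a match here means the processed tail starts with "rajectory"
        apply hraj
        have hKTc : (pvKT : List Char) = 't' :: "rajectory".toList := by decide
        rw [hKTc] at hpre
        simpa [List.cons_prefix_cons] using hpre
      · exact absurd rfl hne
    have hchain : pvChain (c :: t) = pvRK ++ pvChain (t.drop 8) := by
      rw [pvChain, ← hw,
          pvSkipBlocked pvKB pvRB pvKK (by decide),
          pvRep_self _ _ _ (by decide),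
          pvSkipBlocked pvKA pvRA pvRK (by decide), hskipT]
      rfl
    rw [hchain, pvAltScan, if_neg hB, if_pos hK, hL,
        ih (pvSuffix_noKR ((List.drop_suffix _ _).trans (List.suffix_cons _ _)) hKR)]
  | case4 c t hB hK hA ih =>
    intro hKR
    have hL : (pvKA.length - 1 : Nat) = 6 := by decide
    rw [hL] at ih
    obtain ⟨w, hw⟩ := List.isPrefixOf_iff_prefix.mp hA
    have hwd : w = t.drop 6 := by
      have h7 : (pvKA ++ w).drop 7 = w := by
        have hl : pvKA.length = 7 := by decide
        rw [← hl, List.drop_left]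
      rw [hw] at h7
      simpa using h7.symm
    subst hwd
    have hchain : pvChain (c :: t) = pvRA ++ pvChain (t.drop 6) := by
      rw [pvChain, ← hw,
          pvSkipBlocked pvKB pvRB pvKA (by decide),
          pvSkipBlocked pvKK pvRK pvKA (by decide),
          pvRep_self _ _ _ (by decide),
          pvSkipBlocked pvKT pvRT pvRA (by decide)]
      rfl
    rw [hchain, pvAltScan, if_neg hB, if_neg hK, if_pos hA, hL,
        ih (pvSuffix_noKR ((List.drop_suffix _ _).trans (List.suffix_cons _ _)) hKR)]
  | case5 c t hB hK hA hT ih =>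
    intro hKR
    have hL : (pvKT.length - 1 : Nat) = 9 := by decide
    rw [hL] at ih
    obtain ⟨w, hw⟩ := List.isPrefixOf_iff_prefix.mp hT
    have hwd : w = t.drop 9 := by
      have h10 : (pvKT ++ w).drop 10 = w := by
        have hl : pvKT.length = 10 := by decide
        rw [← hl, List.drop_left]
      rw [hw] at h10
      simpa using h10.symm
    subst hwd
    have hchain : pvChain (c :: t) = pvRT ++ pvChain (t.drop 9) := by
      rw [pvChain, ← hw,
          pvSkipBlocked pvKB pvRB pvKT (by decide),
          pvSkipBlocked pvKK pvRK pvKT (by decide),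
          pvSkipBlocked pvKA pvRA pvKT (by decide),
          pvRep_self _ _ _ (by decide)]
      rfl
    rw [hchain, pvAltScan, if_neg hB, if_neg hK, if_neg hA, if_pos hT, hL,
        ih (pvSuffix_noKR ((List.drop_suffix _ _).trans (List.suffix_cons _ _)) hKR)]
  | case6 c t hB hK hA hT ih =>
    intro hKR
    have h1 : pvRep pvKB pvRB (c :: t) = c :: pvRep pvKB pvRB t := pvRep_skip _ hB
    have h2 : pvRep pvKK pvRK (c :: pvRep pvKB pvRB t)
        = c :: pvRep pvKK pvRK (pvRep pvKB pvRB t) := by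
      apply pvRep_skip
      intro hp
      have hp' := List.isPrefixOf_iff_prefix.mp hp
      have hKKc : (pvKK : List Char) = 'k' :: "inematic".toList := by decide
      rw [hKKc, List.cons_prefix_cons] at hp'
      obtain ⟨hc, htail⟩ := hp'
      have hin := pvAvoid pvKB pvRB _ _ (by decide) htail
      exact hK (List.isPrefixOf_iff_prefix.mpr
        (by rw [hKKc, List.cons_prefix_cons]; exact ⟨hc, hin⟩))
    have h3 : pvRep pvKA pvRA (c :: pvRep pvKK pvRK (pvRep pvKB pvRB t))
        = c :: pvRep pvKA pvRA (pvRep pvKK pvRK (pvRep pvKB pvRB t)) := by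
      apply pvRep_skip
      intro hp
      have hp' := List.isPrefixOf_iff_prefix.mp hp
      have hKAc : (pvKA : List Char) = 'a' :: "ngular".toList := by decide
      rw [hKAc, List.cons_prefix_cons] at hp'
      obtain ⟨hc, htail⟩ := hp'
      have g1 := pvAvoid pvKK pvRK _ _ (by decide) htail
      have g2 := pvAvoid pvKB pvRB _ _ (by decide) g1
      exact hA (List.isPrefixOf_iff_prefix.mpr
        (by rw [hKAc, List.cons_prefix_cons]; exact ⟨hc, g2⟩))
    have h4 : pvRep pvKT pvRT (c :: pvRep pvKA pvRA (pvRep pvKK pvRK (pvRep pvKB pvRB t)))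
        = c :: pvRep pvKT pvRT (pvRep pvKA pvRA (pvRep pvKK pvRK (pvRep pvKB pvRB t))) := by
      apply pvRep_skip
      intro hp
      have hp' := List.isPrefixOf_iff_prefix.mp hp
      have hKTc : (pvKT : List Char) = 't' :: "rajectory".toList := by decide
      rw [hKTc, List.cons_prefix_cons] at hp'
      obtain ⟨hc, htail⟩ := hp'
      have g1 := pvAvoid pvKA pvRA _ _ (by decide) htail
      have g2 := pvAvoid pvKK pvRK _ _ (by decide) g1
      have g3 := pvAvoid pvKB pvRB _ _ (by decide) g2
      exact hT (List.isPrefixOf_iff_prefix.mpr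
        (by rw [hKTc, List.cons_prefix_cons]; exact ⟨hc, g3⟩))
    have hchain : pvChain (c :: t) = c :: pvChain t := by
      rw [pvChain, h1, h2, h3, h4]
      rfl
    rw [hchain, pvAltScan, if_neg hB, if_neg hK, if_neg hA, if_neg hT,
        ih (pvSuffix_noKR (List.suffix_cons _ _) hKR)]

-- A's port, reduced to the list-level chain
theorem pvPortA_eq (response : String) :
    simplify_response_py response = String.ofList (pvChain response.toList) := by
  have hitems : (PySem.Dict.ofList
      [("biomechanical", "body position"), ("kinematic", "movement"),
       ("angular", "turning"), ("trajectory", "path")] : PySem.Dict String String).items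
      = [("biomechanical", "body position"), ("kinematic", "movement"),
         ("angular", "turning"), ("trajectory", "path")] := by decide
  show (PySem.Dict.ofList
      [("biomechanical", "body position"), ("kinematic", "movement"),
       ("angular", "turning"), ("trajectory", "path")] : PySem.Dict String String).items.foldl
      (fun r p => PySem.Str.replace r p.1 p.2) response = _
  rw [hitems]
  show PySem.Str.replace (PySem.Str.replace
      (PySem.Str.replace (PySem.Str.replace response "biomechanical" "body position")
      "kinematic" "movement") "angular" "turning") "trajectory" "path" = _
  rw [PySem.Str.replace]
  refine congrArg String.ofList ?_
  rw [PySem.Str.toList_replace, PySem.Str.toList_replace, PySem.Str.toList_replace]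
  rw [pvReplace_eq _ _ _ (by decide), pvReplace_eq _ _ _ (by decide),
      pvReplace_eq _ _ _ (by decide), pvReplace_eq _ _ _ (by decide)]
  rfl

-- an occurrence of k in r ++ w lies inside w when every alignment of k starting in r is impossible
theorem pvInfixSplit (k : List Char) :
    ∀ (r w : List Char), (∀ q ∈ r.tails, q ≠ [] → ¬ k <+: q ++ w) → k <:+: r ++ w → k <:+: w := by
  intro r
  induction r with
  | nil => intro w _ h; simpa using h
  | cons c r' ih =>
    intro w hb h
    rcases List.infix_cons_iff.mp (by simpa using h) with hp | h'
    · exact absurd (show k <+: (c :: r') ++ w by simpa using hp)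
        (hb (c :: r') ((List.mem_tails _ _).mpr (List.suffix_refl _)) (by simp))
    · exact ih w (fun q hq hne => hb q ((List.mem_tails _ _).mpr
        (((List.mem_tails _ _).mp hq).trans (List.suffix_cons c r'))) hne) h'

-- inside D_ the two programs differ everywhere: A rewrites the "trajectory" its own
-- second pass created, B does not
theorem pvExact : ∀ t : List Char, ("kinematicrajectory".toList : List Char) <:+: t →
    pvChain t ≠ pvAltScan t := by
  intro t
  induction t using pvAltScan.induct with
  | case1 =>
    intro h
    rw [List.infix_nil] at h
    exact absurd h (by decide)
  | case2 c t hB ih =>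
    intro hKR
    have hL : (pvKB.length - 1 : Nat) = 12 := by decide
    rw [hL] at ih
    obtain ⟨w, hw⟩ := List.isPrefixOf_iff_prefix.mp hB
    have hwd : w = t.drop 12 := by
      have h13 : (pvKB ++ w).drop 13 = w := by
        have hl : pvKB.length = 13 := by decide
        rw [← hl, List.drop_left]
      rw [hw] at h13
      simpa using h13.symm
    subst hwd
    have hbk : ∀ q ∈ pvKB.tails, q ≠ [] →
        List.take q.length ("kinematicrajectory".toList : List Char) ≠
        List.take ("kinematicrajectory".toList : List Char).length q := by decide
    have hKRw : ("kinematicrajectory".toList : List Char) <:+: t.drop 12 :=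
      pvInfixSplit _ pvKB (t.drop 12)
        (fun q hq hne hp => hbk q hq hne (pvPrefixCompat hp))
        (by rw [hw]; exact hKR)
    have hchain : pvChain (c :: t) = pvRB ++ pvChain (t.drop 12) := by
      rw [pvChain, ← hw, pvRep_self _ _ _ (by decide),
          pvSkipBlocked pvKK pvRK pvRB (by decide),
          pvSkipBlocked pvKA pvRA pvRB (by decide),
          pvSkipBlocked pvKT pvRT pvRB (by decide)]
      rfl
    have halt : pvAltScan (c :: t) = pvRB ++ pvAltScan (t.drop 12) := by
      rw [pvAltScan, if_pos hB, hL]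
    intro heq
    apply ih hKRw
    apply List.append_cancel_left (as := pvRB)
    rw [← hchain, ← halt]
    exact heq
  | case3 c t hB hK ih =>
    intro hKR
    have hL : (pvKK.length - 1 : Nat) = 8 := by decide
    rw [hL] at ih
    obtain ⟨w, hw⟩ := List.isPrefixOf_iff_prefix.mp hK
    have hwd : w = t.drop 8 := by
      have h9 : (pvKK ++ w).drop 9 = w := by
        have hl : pvKK.length = 9 := by decide
        rw [← hl, List.drop_left]
      rw [hw] at h9
      simpa using h9.symm
    subst hwd
    have halt : pvAltScan (c :: t) = pvRK ++ pvAltScan (t.drop 8) := by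
      rw [pvAltScan, if_neg hB, if_pos hK, hL]
    by_cases hrp : ("rajectory".toList : List Char) <+: t.drop 8
    · -- the cascade case: A replaces the freshly created "trajectory", B does not
      obtain ⟨v, hv⟩ := hrp
      have hchainA : pvChain (c :: t) = "movemen".toList ++ (pvRT ++
          pvRep pvKT pvRT (pvRep pvKA pvRA (pvRep pvKK pvRK (pvRep pvKB pvRB v)))) := by
        rw [pvChain, ← hw, ← hv,
            pvSkipBlocked pvKB pvRB pvKK (by decide),
            pvSkipBlocked pvKB pvRB ("rajectory".toList) (by decide),
            pvRep_self pvKK pvRK _ (by decide),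
            pvSkipBlocked pvKK pvRK ("rajectory".toList) (by decide),
            pvSkipBlocked pvKA pvRA pvRK (by decide),
            pvSkipBlocked pvKA pvRA ("rajectory".toList) (by decide),
            show pvRK = "movemen".toList ++ ['t'] from by decide, List.append_assoc,
            pvSkipBlocked pvKT pvRT ("movemen".toList) (by decide),
            ← List.append_assoc,
            show (['t'] : List Char) ++ "rajectory".toList = pvKT from by decide,
            pvRep_self pvKT pvRT _ (by decide)]
      intro heq
      rw [hchainA, halt, show pvRK = "movemen".toList ++ ['t'] from by decide,
          List.append_assoc] at heq
      have h2 := List.append_cancel_left heq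
      rw [show pvRT = 'p' :: "ath".toList from by decide] at h2
      simp at h2
    · -- no cascade here: both copy "movement" and recurse on the tail
      have hKRw : ("kinematicrajectory".toList : List Char) <:+: t.drop 8 := by
        apply pvInfixSplit _ pvKK (t.drop 8) ?_ (by rw [hw]; exact hKR)
        intro q hq hne hp
        have hq' : q = "kinematic".toList ∨ q = "inematic".toList ∨ q = "nematic".toList ∨
            q = "ematic".toList ∨ q = "matic".toList ∨ q = "atic".toList ∨ q = "tic".toList ∨
            q = "ic".toList ∨ q = "c".toList ∨ q = [] := by
          have htails : pvKK.tails = ["kinematic".toList, "inematic".toList, "nematic".toList,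
              "ematic".toList, "matic".toList, "atic".toList, "tic".toList, "ic".toList,
              "c".toList, []] := by decide
          rw [htails] at hq
          simpa using hq
        rcases hq' with rfl | rfl | rfl | rfl | rfl | rfl | rfl | rfl | rfl | rfl
        · -- full alignment: would mean "rajectory" follows, excluded in this branch
          obtain ⟨z, hz⟩ := hp
          rw [show ("kinematicrajectory".toList : List Char)
              = "kinematic".toList ++ "rajectory".toList from by decide,
              List.append_assoc] at hz
          exact hrp ⟨z, List.append_cancel_left hz⟩
        · exact absurd (pvPrefixCompat hp) (by decide)
        · exact absurd (pvPrefixCompat hp) (by decide)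
        · exact absurd (pvPrefixCompat hp) (by decide)
        · exact absurd (pvPrefixCompat hp) (by decide)
        · exact absurd (pvPrefixCompat hp) (by decide)
        · exact absurd (pvPrefixCompat hp) (by decide)
        · exact absurd (pvPrefixCompat hp) (by decide)
        · exact absurd (pvPrefixCompat hp) (by decide)
        · exact absurd rfl hne
      have hraj : ¬ (("rajectory".toList : List Char) <+:
          pvRep pvKA pvRA (pvRep pvKK pvRK (pvRep pvKB pvRB (t.drop 8)))) := by
        intro hp
        have h1 := pvAvoid pvKA pvRA _ _ (by decide) hp
        have h2 := pvAvoid pvKK pvRK _ _ (by decide) h1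
        have h3 := pvAvoid pvKB pvRB _ _ (by decide) h2
        exact hrp h3
      have hskipT : pvRep pvKT pvRT (pvRK ++ pvRep pvKA pvRA (pvRep pvKK pvRK (pvRep pvKB pvRB (t.drop 8))))
          = pvRK ++ pvRep pvKT pvRT (pvRep pvKA pvRA (pvRep pvKK pvRK (pvRep pvKB pvRB (t.drop 8)))) := by
        apply pvSkip
        intro q hq hne hpre
        have hq' : q = "movement".toList ∨ q = "ovement".toList ∨ q = "vement".toList ∨
            q = "ement".toList ∨ q = "ment".toList ∨ q = "ent".toList ∨ q = "nt".toList ∨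
            q = "t".toList ∨ q = [] := by
          have htails : pvRK.tails = ["movement".toList, "ovement".toList, "vement".toList,
              "ement".toList, "ment".toList, "ent".toList, "nt".toList, "t".toList, []] := by decide
          rw [htails] at hq
          simpa using hq
        rcases hq' with rfl | rfl | rfl | rfl | rfl | rfl | rfl | rfl | rfl
        · exact absurd (pvPrefixCompat hpre) (by decide)
        · exact absurd (pvPrefixCompat hpre) (by decide)
        · exact absurd (pvPrefixCompat hpre) (by decide)
        · exact absurd (pvPrefixCompat hpre) (by decide)
        · exact absurd (pvPrefixCompat hpre) (by decide)
        · exact absurd (pvPrefixCompat hpre) (by decide)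
        · exact absurd (pvPrefixCompat hpre) (by decide)
        · apply hraj
          have hKTc : (pvKT : List Char) = 't' :: "rajectory".toList := by decide
          rw [hKTc] at hpre
          simpa [List.cons_prefix_cons] using hpre
        · exact absurd rfl hne
      have hchain : pvChain (c :: t) = pvRK ++ pvChain (t.drop 8) := by
        rw [pvChain, ← hw,
            pvSkipBlocked pvKB pvRB pvKK (by decide),
            pvRep_self _ _ _ (by decide),
            pvSkipBlocked pvKA pvRA pvRK (by decide), hskipT]
        rfl
      intro heq
      apply ih hKRw
      apply List.append_cancel_left (as := pvRK)
      rw [← hchain, ← halt]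
      exact heq
  | case4 c t hB hK hA ih =>
    intro hKR
    have hL : (pvKA.length - 1 : Nat) = 6 := by decide
    rw [hL] at ih
    obtain ⟨w, hw⟩ := List.isPrefixOf_iff_prefix.mp hA
    have hwd : w = t.drop 6 := by
      have h7 : (pvKA ++ w).drop 7 = w := by
        have hl : pvKA.length = 7 := by decide
        rw [← hl, List.drop_left]
      rw [hw] at h7
      simpa using h7.symm
    subst hwd
    have hbk : ∀ q ∈ pvKA.tails, q ≠ [] →
        List.take q.length ("kinematicrajectory".toList : List Char) ≠
        List.take ("kinematicrajectory".toList : List Char).length q := by decide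
    have hKRw : ("kinematicrajectory".toList : List Char) <:+: t.drop 6 :=
      pvInfixSplit _ pvKA (t.drop 6)
        (fun q hq hne hp => hbk q hq hne (pvPrefixCompat hp))
        (by rw [hw]; exact hKR)
    have hchain : pvChain (c :: t) = pvRA ++ pvChain (t.drop 6) := by
      rw [pvChain, ← hw,
          pvSkipBlocked pvKB pvRB pvKA (by decide),
          pvSkipBlocked pvKK pvRK pvKA (by decide),
          pvRep_self _ _ _ (by decide),
          pvSkipBlocked pvKT pvRT pvRA (by decide)]
      rfl
    have halt : pvAltScan (c :: t) = pvRA ++ pvAltScan (t.drop 6) := by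
      rw [pvAltScan, if_neg hB, if_neg hK, if_pos hA, hL]
    intro heq
    apply ih hKRw
    apply List.append_cancel_left (as := pvRA)
    rw [← hchain, ← halt]
    exact heq
  | case5 c t hB hK hA hT ih =>
    intro hKR
    have hL : (pvKT.length - 1 : Nat) = 9 := by decide
    rw [hL] at ih
    obtain ⟨w, hw⟩ := List.isPrefixOf_iff_prefix.mp hT
    have hwd : w = t.drop 9 := by
      have h10 : (pvKT ++ w).drop 10 = w := by
        have hl : pvKT.length = 10 := by decide
        rw [← hl, List.drop_left]
      rw [hw] at h10
      simpa using h10.symm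
    subst hwd
    have hbk : ∀ q ∈ pvKT.tails, q ≠ [] →
        List.take q.length ("kinematicrajectory".toList : List Char) ≠
        List.take ("kinematicrajectory".toList : List Char).length q := by decide
    have hKRw : ("kinematicrajectory".toList : List Char) <:+: t.drop 9 :=
      pvInfixSplit _ pvKT (t.drop 9)
        (fun q hq hne hp => hbk q hq hne (pvPrefixCompat hp))
        (by rw [hw]; exact hKR)
    have hchain : pvChain (c :: t) = pvRT ++ pvChain (t.drop 9) := by
      rw [pvChain, ← hw,
          pvSkipBlocked pvKB pvRB pvKT (by decide),
          pvSkipBlocked pvKK pvRK pvKT (by decide),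
          pvSkipBlocked pvKA pvRA pvKT (by decide),
          pvRep_self _ _ _ (by decide)]
      rfl
    have halt : pvAltScan (c :: t) = pvRT ++ pvAltScan (t.drop 9) := by
      rw [pvAltScan, if_neg hB, if_neg hK, if_neg hA, if_pos hT, hL]
    intro heq
    apply ih hKRw
    apply List.append_cancel_left (as := pvRT)
    rw [← hchain, ← halt]
    exact heq
  | case6 c t hB hK hA hT ih =>
    intro hKR
    have hKRt : ("kinematicrajectory".toList : List Char) <:+: t := by
      rcases List.infix_cons_iff.mp hKR with hp | h'
      · exact absurd (List.isPrefixOf_iff_prefix.mpr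
          ((show (pvKK : List Char) <+: "kinematicrajectory".toList by decide).trans hp)) hK
      · exact h'
    have h1 : pvRep pvKB pvRB (c :: t) = c :: pvRep pvKB pvRB t := pvRep_skip _ hB
    have h2 : pvRep pvKK pvRK (c :: pvRep pvKB pvRB t)
        = c :: pvRep pvKK pvRK (pvRep pvKB pvRB t) := by
      apply pvRep_skip
      intro hp
      have hp' := List.isPrefixOf_iff_prefix.mp hp
      have hKKc : (pvKK : List Char) = 'k' :: "inematic".toList := by decide
      rw [hKKc, List.cons_prefix_cons] at hp'
      obtain ⟨hc, htail⟩ := hp'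
      have hin := pvAvoid pvKB pvRB _ _ (by decide) htail
      exact hK (List.isPrefixOf_iff_prefix.mpr
        (by rw [hKKc, List.cons_prefix_cons]; exact ⟨hc, hin⟩))
    have h3 : pvRep pvKA pvRA (c :: pvRep pvKK pvRK (pvRep pvKB pvRB t))
        = c :: pvRep pvKA pvRA (pvRep pvKK pvRK (pvRep pvKB pvRB t)) := by
      apply pvRep_skip
      intro hp
      have hp' := List.isPrefixOf_iff_prefix.mp hp
      have hKAc : (pvKA : List Char) = 'a' :: "ngular".toList := by decide
      rw [hKAc, List.cons_prefix_cons] at hp'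
      obtain ⟨hc, htail⟩ := hp'
      have g1 := pvAvoid pvKK pvRK _ _ (by decide) htail
      have g2 := pvAvoid pvKB pvRB _ _ (by decide) g1
      exact hA (List.isPrefixOf_iff_prefix.mpr
        (by rw [hKAc, List.cons_prefix_cons]; exact ⟨hc, g2⟩))
    have h4 : pvRep pvKT pvRT (c :: pvRep pvKA pvRA (pvRep pvKK pvRK (pvRep pvKB pvRB t)))
        = c :: pvRep pvKT pvRT (pvRep pvKA pvRA (pvRep pvKK pvRK (pvRep pvKB pvRB t))) := by
      apply pvRep_skip
      intro hp
      have hp' := List.isPrefixOf_iff_prefix.mp hp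
      have hKTc : (pvKT : List Char) = 't' :: "rajectory".toList := by decide
      rw [hKTc, List.cons_prefix_cons] at hp'
      obtain ⟨hc, htail⟩ := hp'
      have g1 := pvAvoid pvKA pvRA _ _ (by decide) htail
      have g2 := pvAvoid pvKK pvRK _ _ (by decide) g1
      have g3 := pvAvoid pvKB pvRB _ _ (by decide) g2
      exact hT (List.isPrefixOf_iff_prefix.mpr
        (by rw [hKTc, List.cons_prefix_cons]; exact ⟨hc, g3⟩))
    have hchain : pvChain (c :: t) = c :: pvChain t := by
      rw [pvChain, h1, h2, h3, h4]
      rfl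
    have halt : pvAltScan (c :: t) = c :: pvAltScan t := by
      rw [pvAltScan, if_neg hB, if_neg hK, if_neg hA, if_neg hT]
    intro heq
    rw [hchain, halt] at heq
    exact ih hKRt (by simpa using heq)

-- ===== VERDICT (by name: the statement is the Claim_ definition above) =====
theorem simplify_response_py_spec : Claim_unchanged_simplify_response_py := by
  intro response _ hD
  have hKR : ¬ ("kinematicrajectory".toList <:+: response.toList) := by
    intro hi
    apply hD
    show PySem.Str.isIn "kinematicrajectory" response = true
    rw [PySem.Str.isIn_eq]
    exact (PySem.Chars.isIn_iff_infix _ _).mpr hi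
  rw [pvPortA_eq, simplify_response_py_alt, pvMain _ hKR]

theorem simplify_response_py_changed : Claim_changed_simplify_response_py := by
  unfold Claim_changed_simplify_response_py
  refine ⟨by decide, by decide, ?_, ?_, by decide⟩
  · rw [pvPortA_eq]
    have h : pvChain (pvDiffWitness_simplify_response_py.toList) = "movemenpath".toList := by
      simp [pvChain, pvRep, pvDiffWitness_simplify_response_py, pvKB, pvKK, pvKA, pvKT, pvRB, pvRK, pvRA, pvRT]
    rw [h]; decide
  · show String.ofList (pvAltScan pvDiffWitness_simplify_response_py.toList) = _
    have h : pvAltScan (pvDiffWitness_simplify_response_py.toList) = "movementrajectory".toList := by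
      simp [pvAltScan, pvDiffWitness_simplify_response_py, pvKB, pvKK, pvKA, pvKT, pvRK]
    rw [h]; decide

theorem simplify_response_py_tight : Claim_exact_simplify_response_py := by
  intro response _ hD heq
  have hKR : ("kinematicrajectory".toList : List Char) <:+: response.toList := by
    have hD' : PySem.Str.isIn "kinematicrajectory" response = true := hD
    rw [PySem.Str.isIn_eq] at hD'
    exact (PySem.Chars.isIn_iff_infix _ _).mp hD'
  apply pvExact response.toList hKR
  have h2 : String.ofList (pvChain response.toList)
      = String.ofList (pvAltScan response.toList) := by
    rw [← pvPortA_eq]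
    exact heq
  have h3 := congrArg String.toList h2
  simpa using h3
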